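-- pv_equiv track=rewrite | github.com/chmp/framequery | src/framequery/executor/_util.py | split_quoted_name
-- ===== SOURCE A (Python) =====
-- def split_quoted_name(name):
--     parts = []
--     current = ''
--
--     in_string = False
--     after_quote = False
--
--     for c in name:
--         if after_quote:
--             current += c
--             after_quote = False
--
--         elif in_string and c != '"':
--             current += c
--
--         elif c == '"':
--             in_string = not in_string
--
--         elif c == '\\':
--             after_quote = True
--
--         elif c == '.':
--             parts.append(current)
--             current = ''
--
--         else:
--             current += c
--
--     parts.append(current)
--
--     return parts
-- ===== SOURCE B (Python) =====
-- def split_quoted_name(name):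
--     parts = []
--     current = []
--     i = 0
--     n = len(name)
--     while i < n:
--         c = name[i]
--         if c == '"':
--             i += 1
--             while i < n and name[i] != '"':
--                 current.append(name[i])
--                 i += 1
--             i += 1
--         elif c == '\\':
--             i += 1
--             if i < n:
--                 current.append(name[i])
--             i += 1
--         elif c == '.':
--             parts.append(''.join(current))
--             current = []
--             i += 1
--         else:
--             current.append(c)
--             i += 1
--     parts.append(''.join(current))
--     return parts
-- ===== Notes on version B (the rewrite author's own statement) =====
-- stated objective: alternative
-- what changed: Replaced A's one-character-at-a-time boolean-flag state machine (in_string/after_quote flags, string concatenation) with an index-based scanner that consumes each quoted run in a nested inner loop, handles a backslash by one-character lookahead, and accumulates characters in a list joined at each flush.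
import Mathlib
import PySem

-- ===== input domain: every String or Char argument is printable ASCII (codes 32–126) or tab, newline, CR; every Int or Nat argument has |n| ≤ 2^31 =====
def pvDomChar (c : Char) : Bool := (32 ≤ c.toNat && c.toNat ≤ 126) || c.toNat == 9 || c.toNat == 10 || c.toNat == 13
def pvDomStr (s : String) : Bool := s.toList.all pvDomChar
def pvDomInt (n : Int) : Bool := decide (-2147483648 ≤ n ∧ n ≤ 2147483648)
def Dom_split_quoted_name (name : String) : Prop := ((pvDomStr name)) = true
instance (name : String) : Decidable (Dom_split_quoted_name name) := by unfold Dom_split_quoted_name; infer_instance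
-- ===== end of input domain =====

-- B replaces A's boolean-flag state machine by an index-style scanner that consumes
-- quoted runs in a nested inner loop and escapes by lookahead (objective: alternative).

-- ===== PORT A =====
-- state: (parts, current, in_string, after_quote)
def stepA (s : List String × List Char × Bool × Bool) (c : Char) :
    List String × List Char × Bool × Bool :=
  let (parts, current, in_string, after_quote) := s
  if after_quote then (parts, current ++ [c], in_string, false)
  else if in_string && c ≠ '"' then (parts, current ++ [c], in_string, after_quote)
  else if c = '"' then (parts, current, !in_string, after_quote)
  else if c = '\\' then (parts, current, in_string, true)
  else if c = '.' then (parts ++ [String.mk current], [], in_string, after_quote)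
  else (parts, current ++ [c], in_string, after_quote)

def finishA (s : List String × List Char × Bool × Bool) : List String :=
  s.1 ++ [String.mk s.2.1]

def split_quoted_name (name : String) : List String :=
  finishA (name.toList.foldl stepA ([], [], false, false))

-- ===== PORT B =====
-- the inner `while i < n and name[i] != '"'` loop: (copied chars, rest after closing quote)
def scanQuoted : List Char → List Char × List Char
  | [] => ([], [])
  | c :: rest =>
    if c = '"' then ([], rest)
    else
      let p := scanQuoted rest
      (c :: p.1, p.2)

theorem scanQuoted_len : ∀ (l : List Char), (scanQuoted l).2.length ≤ l.length := by
  intro l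
  induction l with
  | nil => simp [scanQuoted, finishA]
  | cons c rest ih =>
    by_cases h : c = '"' <;> simp [scanQuoted, h] <;> omega

-- the outer index loop, as structural recursion on the remaining characters
def scanB : List Char → List Char → List String
  | [], current => [String.mk current]
  | c :: rest, current =>
    if c = '"' then
      scanB (scanQuoted rest).2 (current ++ (scanQuoted rest).1)
    else if c = '\\' then
      match rest with
      | [] => [String.mk current]
      | d :: rest' => scanB rest' (current ++ [d])
    else if c = '.' then
      String.mk current :: scanB rest []
    else
      scanB rest (current ++ [c])
termination_by l _ => l.length
decreasing_by
  · have := scanQuoted_len rest; simp; omega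
  · simp
  · simp
  · simp

def split_quoted_name_alt (name : String) : List String :=
  scanB name.toList []

-- ===== PRECONDITION & SPEC =====
def Spec_split_quoted_name (name : String) (out : List String) : Prop := out = split_quoted_name_alt name
instance (name : String) (out : List String) : Decidable (Spec_split_quoted_name name out) := by unfold Spec_split_quoted_name; infer_instance

-- ===== CLAIM (what is proved, stated in full; the proofs are below) =====
def Claim_equal_split_quoted_name : Prop := ∀ (name : String), Dom_split_quoted_name name → Spec_split_quoted_name name (split_quoted_name name)

-- ===== LEMMAS AND PROOFS =====

-- A's fold while in_string = true consumes exactly what scanQuoted consumes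
theorem foldA_quoted : ∀ (l : List Char) (parts : List String) (current : List Char),
    finishA (l.foldl stepA (parts, current, true, false)) =
      finishA ((scanQuoted l).2.foldl stepA (parts, current ++ (scanQuoted l).1, false, false)) := by
  intro l
  induction l with
  | nil => simp [scanQuoted, finishA]
  | cons c rest ih =>
    intro parts current
    by_cases h : c = '"'
    · simp [scanQuoted, h, List.foldl, stepA]
    · simp only [scanQuoted, h, if_neg, List.foldl]
      have hs : stepA (parts, current, true, false) c = (parts, current ++ [c], true, false) := by
        simp [stepA, h]
      rw [hs, ih]
      simp

-- A's fold with after_quote = true copies one character literally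
theorem foldA_afterquote : ∀ (l : List Char) (parts : List String) (current : List Char),
    finishA (l.foldl stepA (parts, current, false, true)) =
      (match l with
       | [] => parts ++ [String.mk current]
       | d :: rest => finishA (rest.foldl stepA (parts, current ++ [d], false, false))) := by
  intro l parts current
  cases l with
  | nil => simp [finishA]
  | cons d rest => simp [List.foldl, stepA]

-- main invariant: A's fold from the neutral state equals B's scanner
theorem foldA_eq_scanB : ∀ (n : Nat) (l : List Char), l.length ≤ n →
    ∀ (parts : List String) (current : List Char),
      finishA (l.foldl stepA (parts, current, false, false)) = parts ++ scanB l current := by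
  intro n
  induction n with
  | zero =>
    intro l hl parts current
    have : l = [] := List.eq_nil_of_length_eq_zero (Nat.le_zero.mp hl)
    subst this
    simp [scanB, finishA]
  | succ n ih =>
    intro l hl parts current
    cases l with
    | nil => simp [scanB, finishA]
    | cons c rest =>
      simp only [List.length_cons] at hl
      by_cases hq : c = '"'
      · have hs : stepA (parts, current, false, false) c = (parts, current, true, false) := by
          simp [stepA, hq]
        have hlen : (scanQuoted rest).2.length ≤ n := le_trans (scanQuoted_len rest) (by omega)
        simp only [List.foldl, hs]
        rw [foldA_quoted, ih _ hlen]
        conv_rhs => rw [scanB.eq_def]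
        simp
        exact fun h => absurd hq h
      · by_cases hb : c = '\\'
        · have hs : stepA (parts, current, false, false) c = (parts, current, false, true) := by
            simp [stepA, hq, hb]
          simp only [List.foldl, hs]
          rw [foldA_afterquote]
          cases rest with
          | nil => simp [scanB, hq, hb, finishA]
          | cons d rest' =>
            simp only
            rw [ih _ (by simp at hl ⊢; omega)]
            simp [scanB, hq, hb]
        · by_cases hd : c = '.'
          · have hs : stepA (parts, current, false, false) c =
                (parts ++ [String.mk current], [], false, false) := by
              simp [stepA, hq, hb, hd]
            simp only [List.foldl, hs]
            rw [ih _ (by omega)]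
            conv_rhs => rw [scanB.eq_def]
            simp [hq, hb]
            exact fun h => absurd hd h
          · have hs : stepA (parts, current, false, false) c =
                (parts, current ++ [c], false, false) := by
              simp [stepA, hq, hb, hd]
            simp only [List.foldl, hs]
            rw [ih _ (by omega)]
            conv_rhs => rw [scanB.eq_def]
            simp [hq, hb, hd]

-- ===== VERDICT (by name: the statement is the Claim_ definition above) =====
theorem split_quoted_name_spec : Claim_equal_split_quoted_name := by
  intro name _
  unfold Spec_split_quoted_name split_quoted_name split_quoted_name_alt
  have := foldA_eq_scanB name.toList.length name.toList le_rfl [] []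
  simpa using this
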